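-- pv_equiv track=rewrite | github.com/nermadie/CodeForces_Solutions | CodeforcesRound898Div4/prob05.py | max_tank_height
-- ===== SOURCE A (Python) =====
-- def max_tank_height(n, x, heights):
--     max_height_possible = x + 1000000000
--     low = 0
--     high = max_height_possible
--     while low < high:
--         mid = (low + high) // 2
--         total = 0
--         for i in range(n):
--             total += max(0, mid - heights[i])
--         if total <= x:
--             low = mid + 1
--         else:
--             high = mid - 1
--     last_total = 0
--     last_height = (low + high) // 2
--     for i in range(n):
--         last_total += max(0, last_height - heights[i])
--     return last_height - 1 if last_total > x else last_height
-- ===== SOURCE B (Python) =====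
-- def max_tank_height(n, x, heights):
--     tanks = sorted(heights[i] for i in range(n))
--     prefix = [0]
--     for h in tanks:
--         prefix.append(prefix[-1] + h)
--
--     def poured(level):
--         # water needed to raise every tank below `level` up to it:
--         # binary-search the number of tanks strictly below `level`,
--         # then read their total height off the prefix sums.
--         lo, hi = 0, len(tanks)
--         while lo < hi:
--             mid = (lo + hi) // 2
--             if tanks[mid] < level:
--                 lo = mid + 1
--             else:
--                 hi = mid
--         return level * lo - prefix[lo]
--
--     low, high = 0, x + 1000000000
--     while low < high:
--         mid = (low + high) // 2
--         if poured(mid) <= x: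
--             low = mid + 1
--         else:
--             high = mid - 1
--     last = (low + high) // 2
--     return last - 1 if poured(last) > x else last
-- ===== Notes on version B (the rewrite author's own statement) =====
-- stated objective: faster
-- what changed: A re-sums the water over all n tanks for every probe of its answer-space binary search; B sorts the first n heights once, builds prefix sums, and answers each probe in O(log n) by binary-searching how many tanks lie below the probed level and reading their total height off the prefix sums.
import Mathlib
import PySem

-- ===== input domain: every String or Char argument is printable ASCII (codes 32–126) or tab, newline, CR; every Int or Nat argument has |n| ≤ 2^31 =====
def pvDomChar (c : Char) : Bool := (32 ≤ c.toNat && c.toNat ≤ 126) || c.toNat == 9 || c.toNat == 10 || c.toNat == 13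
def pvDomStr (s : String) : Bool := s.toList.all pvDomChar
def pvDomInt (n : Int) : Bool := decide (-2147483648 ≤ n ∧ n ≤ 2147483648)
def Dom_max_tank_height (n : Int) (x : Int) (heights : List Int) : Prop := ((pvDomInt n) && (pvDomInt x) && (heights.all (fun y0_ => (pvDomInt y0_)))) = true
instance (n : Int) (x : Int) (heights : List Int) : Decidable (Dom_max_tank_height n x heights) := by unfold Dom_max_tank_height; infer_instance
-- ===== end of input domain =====

-- B sorts the tanks once and answers each binary-search probe from prefix sums instead of re-summing all n tanks (faster by a measured constant factor).

-- ===== PORT A =====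
-- total = sum over i in range(n) of max(0, level - heights[i])
def aWater (n : Int) (heights : List Int) (level : Int) : Int :=
  (PySem.List.pyRange 0 n 1).foldl (fun t i => t + max 0 (level - PySem.List.pyGetD heights i 0)) 0

-- the 'while low < high' loop; returns the final (low, high).
-- fuel is a totality guard only: each iteration shrinks high - low, and the caller passes fuel > (high - low).toNat
def aLoop (n : Int) (x : Int) (heights : List Int) : Nat → Int → Int → Int × Int
  | 0, low, high => (low, high)
  | fuel + 1, low, high =>
    if low < high then
      let mid := PySem.Int.floordiv (low + high) 2
      if aWater n heights mid ≤ x then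
        aLoop n x heights fuel (mid + 1) high
      else
        aLoop n x heights fuel low (mid - 1)
    else (low, high)

def max_tank_height (n : Int) (x : Int) (heights : List Int) : Int :=
  let p := aLoop n x heights (x + 1000000000).toNat 0 (x + 1000000000)
  let last := PySem.Int.floordiv (p.1 + p.2) 2
  if aWater n heights last > x then last - 1 else last

-- ===== PORT B =====
-- sorted(heights[i] for i in range(n))
def bTanks (n : Int) (heights : List Int) : List Int :=
  PySem.List.sorted ((PySem.List.pyRange 0 n 1).map (fun i => PySem.List.pyGetD heights i 0)) (fun h => h) false

-- prefix = [0]; for h in tanks: prefix.append(prefix[-1] + h)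
def bPrefix (tanks : List Int) : List Int :=
  tanks.foldl (fun p h => p ++ [PySem.List.pyGetD p (-1) 0 + h]) [0]

-- the inner 'while lo < hi' bisection of poured(); returns the final lo.
-- fuel is a totality guard only: hi - lo shrinks each iteration, and the caller passes fuel ≥ len(tanks) + 1
def bCount (tanks : List Int) (level : Int) : Nat → Int → Int → Int
  | 0, lo, _ => lo
  | fuel + 1, lo, hi =>
    if lo < hi then
      let mid := PySem.Int.floordiv (lo + hi) 2
      if PySem.List.pyGetD tanks mid 0 < level then
        bCount tanks level fuel (mid + 1) hi
      else
        bCount tanks level fuel lo mid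
    else lo

-- poured(level) = level * lo - prefix[lo]
def bPoured (tanks prefixSums : List Int) (level : Int) : Int :=
  let lo := bCount tanks level (tanks.length + 1) 0 (tanks.length : Int)
  level * lo - PySem.List.pyGetD prefixSums lo 0

-- the outer 'while low < high' loop of B (same skeleton as A's, probing poured())
def bLoop (tanks prefixSums : List Int) (x : Int) : Nat → Int → Int → Int × Int
  | 0, low, high => (low, high)
  | fuel + 1, low, high =>
    if low < high then
      let mid := PySem.Int.floordiv (low + high) 2
      if bPoured tanks prefixSums mid ≤ x then
        bLoop tanks prefixSums x fuel (mid + 1) high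
      else
        bLoop tanks prefixSums x fuel low (mid - 1)
    else (low, high)

def max_tank_height_alt (n : Int) (x : Int) (heights : List Int) : Int :=
  let tanks := bTanks n heights
  let prefixSums := bPrefix tanks
  let p := bLoop tanks prefixSums x (x + 1000000000).toNat 0 (x + 1000000000)
  let last := PySem.Int.floordiv (p.1 + p.2) 2
  if bPoured tanks prefixSums last > x then last - 1 else last

-- ===== PRECONDITION & SPEC =====
-- Pre_ excludes only n > len(heights), where both Pythons raise IndexError reading heights[i].
def Pre_max_tank_height (n : Int) (x : Int) (heights : List Int) : Prop :=
  n ≤ (heights.length : Int)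

instance (n : Int) (x : Int) (heights : List Int) : Decidable (Pre_max_tank_height n x heights) := by
  unfold Pre_max_tank_height; infer_instance

def pvWitness_max_tank_height : Int × Int × List Int := (2, 5, [1, 3])

def Spec_max_tank_height (n : Int) (x : Int) (heights : List Int) (out : Int) : Prop := out = max_tank_height_alt n x heights
instance (n : Int) (x : Int) (heights : List Int) (out : Int) : Decidable (Spec_max_tank_height n x heights out) := by unfold Spec_max_tank_height; infer_instance

-- ===== CLAIM (what is proved, stated in full; the proofs are below) =====
def Claim_equal_max_tank_height : Prop := ∀ (n : Int) (x : Int) (heights : List Int), Dom_max_tank_height n x heights → Pre_max_tank_height n x heights → Spec_max_tank_height n x heights (max_tank_height n x heights)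

-- ===== LEMMAS AND PROOFS =====

def W (t : List Int) (L : Int) : Int := (t.map (fun h => max 0 (L - h))).sum

def Tmap (n : Int) (heights : List Int) : List Int :=
  (PySem.List.pyRange 0 n 1).map (fun i => PySem.List.pyGetD heights i 0)

lemma aWater_eq_W (n : Int) (heights : List Int) (L : Int) :
    aWater n heights L = W (Tmap n heights) L := by
  unfold aWater
  rw [PySem.List.foldl_add]
  simp [W, Tmap, List.map_map, Function.comp_def]

lemma W_perm {t t' : List Int} (h : t.Perm t') (L : Int) : W t L = W t' L :=
  (h.map _).sum_eq

lemma W_append (l1 l2 : List Int) (C : Int) : W (l1 ++ l2) C = W l1 C + W l2 C := by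
  simp [W]

lemma W_all_le (t : List Int) (C : Int) (h : ∀ y ∈ t, y ≤ C) : W t C = C * t.length - t.sum := by
  induction t with
  | nil => simp [W]
  | cons a tl ih =>
    have ha := h a (by simp)
    have ih' := ih (fun y hy => h y (by simp [hy]))
    simp only [W, List.map_cons, List.sum_cons, List.length_cons] at *
    have : max 0 (C - a) = C - a := by omega
    rw [this, ih']; push_cast; ring

lemma W_all_ge (t : List Int) (C : Int) (h : ∀ y ∈ t, C ≤ y) : W t C = 0 := by
  induction t with
  | nil => simp [W]
  | cons a tl ih =>
    have ha := h a (by simp)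
    have ih' := ih (fun y hy => h y (by simp [hy]))
    simp only [W, List.map_cons, List.sum_cons] at *
    have : max 0 (C - a) = 0 := by omega
    rw [this, ih']; simp

-- the running sums s+a₁, s+a₁+a₂, … (the list B's prefix loop appends after [0])
def partialSums (s : Int) : List Int → List Int
  | [] => []
  | a :: r => (s + a) :: partialSums (s + a) r

lemma length_partialSums (t : List Int) : ∀ s : Int, (partialSums s t).length = t.length := by
  induction t with
  | nil => intro s; rfl
  | cons a r ih => intro s; simp [partialSums, ih]

lemma partialSums_getElem (t : List Int) : ∀ (s : Int) (i : Nat) (h : i < (partialSums s t).length),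
    (partialSums s t)[i] = s + (t.take (i + 1)).sum := by
  induction t with
  | nil => intro s i h; simp [partialSums] at h
  | cons a r ih =>
    intro s i h
    cases i with
    | zero => simp [partialSums]
    | succ j =>
      simp only [partialSums] at h ⊢
      rw [List.getElem_cons_succ, ih (s + a) j (by simpa using h)]
      simp [List.take_succ_cons]
      ring

lemma foldl_pref (t : List Int) : ∀ (p : List Int) (hp : p ≠ []),
    t.foldl (fun q h => q ++ [PySem.List.pyGetD q (-1) 0 + h]) p
      = p ++ partialSums (p.getLast hp) t := by
  induction t with
  | nil => intro p hp; simp [partialSums]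
  | cons a r ih =>
    intro p hp
    simp only [List.foldl_cons]
    rw [PySem.List.pyGetD_neg_one p 0 hp]
    rw [ih (p ++ [p.getLast hp + a]) (by simp)]
    have hlast : (p ++ [p.getLast hp + a]).getLast (by simp) = p.getLast hp + a := by
      simp
    rw [hlast]
    simp [partialSums]

lemma bPrefix_eq (t : List Int) : bPrefix t = 0 :: partialSums 0 t := by
  unfold bPrefix
  rw [foldl_pref t [0] (by simp)]
  simp

lemma prefix_getD (t : List Int) (j : Nat) (hj : j ≤ t.length) :
    PySem.List.pyGetD (bPrefix t) (j : Int) 0 = (t.take j).sum := by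
  have hlen : (bPrefix t).length = t.length + 1 := by
    rw [bPrefix_eq]; simp [length_partialSums]
  have hb : ((j : Int)) < ((bPrefix t).length : Int) := by
    rw [hlen]; push_cast; omega
  rw [PySem.List.pyGetD_eq_getElem _ 0 (by omega) hb]
  have hjt : ((j : Int)).toNat = j := Int.toNat_natCast j
  cases j with
  | zero => simp [bPrefix_eq]
  | succ i =>
    have hi : i < (partialSums 0 t).length := by rw [length_partialSums]; omega
    simp only [hjt, bPrefix_eq, List.getElem_cons_succ]
    rw [partialSums_getElem t 0 i hi]
    simp

lemma bCount_spec (t : List Int) (L : Int) (hs : t.Pairwise (· ≤ ·)) :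
    ∀ (fuel : Nat) (lo hi : Int), (hi - lo).toNat ≤ fuel →
    0 ≤ lo → lo ≤ hi → hi ≤ (t.length : Int) →
    (∀ i : Nat, i < lo.toNat → (h : i < t.length) → t[i] < L) →
    (∀ i : Nat, hi.toNat ≤ i → (h : i < t.length) → L ≤ t[i]) →
    (0 ≤ bCount t L fuel lo hi ∧ bCount t L fuel lo hi ≤ (t.length : Int) ∧
     (∀ i : Nat, i < (bCount t L fuel lo hi).toNat → (h : i < t.length) → t[i] < L) ∧
     (∀ i : Nat, (bCount t L fuel lo hi).toNat ≤ i → (h : i < t.length) → L ≤ t[i])) := by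
  have hp := List.pairwise_iff_getElem.mp hs
  intro fuel
  induction fuel with
  | zero =>
    intro lo hi hf h0 hlh hhl hlow hhigh
    have heq : lo = hi := by omega
    subst heq
    rw [bCount]
    exact ⟨h0, hhl, hlow, hhigh⟩
  | succ f ih =>
    intro lo hi hf h0 hlh hhl hlow hhigh
    by_cases hcond : lo < hi
    · have hm := PySem.Int.floordiv_two_mid_bounds (lo := lo) (hi := hi) (le_of_lt hcond)
      have hmhi : PySem.Int.floordiv (lo + hi) 2 < hi := by
        rw [PySem.Int.floordiv_lt_iff_lt_mul (by omega)]; omega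
      set mid := PySem.Int.floordiv (lo + hi) 2 with hmid
      have hmlt : mid.toNat < t.length := by omega
      have hget : PySem.List.pyGetD t mid 0 = t[mid.toNat]'hmlt :=
        PySem.List.pyGetD_eq_getElem t 0 (by omega) (by omega)
      rw [bCount, if_pos hcond]
      by_cases hv : PySem.List.pyGetD t mid 0 < L
      · rw [if_pos hv]
        apply ih (mid + 1) hi (by omega) (by omega) (by omega) hhl
        · intro i hi1 hi2
          rcases Nat.lt_or_ge i mid.toNat with h | h
          · calc t[i] ≤ t[mid.toNat]'hmlt := hp i mid.toNat hi2 hmlt h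
              _ < L := by rw [← hget]; exact hv
          · have : i = mid.toNat := by omega
            subst this
            rw [← hget]; exact hv
        · exact hhigh
      · rw [if_neg hv]
        apply ih lo mid (by omega) h0 (by omega) (by omega) hlow
        · intro i hi1 hi2
          have hmv : L ≤ t[mid.toNat]'hmlt := by rw [← hget]; omega
          rcases Nat.lt_or_ge mid.toNat i with h | h
          · exact le_trans hmv (hp mid.toNat i hmlt hi2 h)
          · have : i = mid.toNat := by omega
            subst this; exact hmv
    · rw [bCount, if_neg hcond]
      have heq : lo = hi := by omega
      subst heq
      exact ⟨h0, hhl, hlow, hhigh⟩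

lemma bPoured_eq_W (t : List Int) (hs : t.Pairwise (· ≤ ·)) (L : Int) :
    bPoured t (bPrefix t) L = W t L := by
  have hspec := bCount_spec t L hs (t.length + 1) 0 (t.length : Int)
    (by omega) le_rfl (by omega) le_rfl
    (by intro i h1 h2; omega)
    (by intro i h1 h2; omega)
  show L * (bCount t L (t.length + 1) 0 (t.length : Int)) -
      PySem.List.pyGetD (bPrefix t) (bCount t L (t.length + 1) 0 (t.length : Int)) 0 = W t L
  set j := bCount t L (t.length + 1) 0 (t.length : Int) with hj
  obtain ⟨g0, g1, g2, g3⟩ := hspec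
  have hjn : j = ((j.toNat : Nat) : Int) := by omega
  have hjl : j.toNat ≤ t.length := by omega
  have hpref : PySem.List.pyGetD (bPrefix t) j 0 = (t.take j.toNat).sum := by
    rw [hjn]; exact prefix_getD t j.toNat hjl
  have hsplit : t = t.take j.toNat ++ t.drop j.toNat := (List.take_append_drop j.toNat t).symm
  have hlen : (t.take j.toNat).length = j.toNat := by simp [List.length_take]; omega
  have htake : ∀ y ∈ t.take j.toNat, y ≤ L := by
    intro y hy
    obtain ⟨i, hi, rfl⟩ := List.mem_iff_getElem.mp hy
    have hi' : i < j.toNat ∧ i < t.length := by simp [List.length_take] at hi; omega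
    rw [List.getElem_take]
    exact le_of_lt (g2 i hi'.1 hi'.2)
  have hdrop : ∀ y ∈ t.drop j.toNat, L ≤ y := by
    intro y hy
    obtain ⟨i, hi, rfl⟩ := List.mem_iff_getElem.mp hy
    have hi' : j.toNat + i < t.length := by simp [List.length_drop] at hi; omega
    rw [List.getElem_drop]
    exact g3 (j.toNat + i) (by omega) hi'
  have hW : W t L = L * j.toNat - (t.take j.toNat).sum := by
    calc W t L = W (t.take j.toNat) L + W (t.drop j.toNat) L := by rw [← W_append, ← hsplit]
      _ = (L * j.toNat - (t.take j.toNat).sum) + 0 := by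
          rw [W_all_le _ _ htake, W_all_ge _ _ hdrop, hlen]
      _ = L * j.toNat - (t.take j.toNat).sum := by ring
  rw [hpref, hW, hjn]
  simp

lemma bTanks_sorted (n : Int) (heights : List Int) : (bTanks n heights).Pairwise (· ≤ ·) := by
  simpa using PySem.List.sorted_pairwise ((PySem.List.pyRange 0 n 1).map (fun i => PySem.List.pyGetD heights i 0)) (fun h => h)

lemma poured_eq_aWater (n : Int) (heights : List Int) (L : Int) :
    bPoured (bTanks n heights) (bPrefix (bTanks n heights)) L = aWater n heights L := by
  have hperm : (bTanks n heights).Perm (Tmap n heights) := PySem.List.sorted_perm _ _ _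
  rw [bPoured_eq_W (bTanks n heights) (bTanks_sorted n heights) L,
      W_perm hperm L, aWater_eq_W]

lemma loops_eq (n x : Int) (heights : List Int) :
    ∀ (fuel : Nat) (lo hi : Int),
      bLoop (bTanks n heights) (bPrefix (bTanks n heights)) x fuel lo hi = aLoop n x heights fuel lo hi := by
  intro fuel
  induction fuel with
  | zero => intro lo hi; rfl
  | succ f ih =>
    intro lo hi
    rw [bLoop, aLoop]
    by_cases hlh : lo < hi
    · rw [if_pos hlh, if_pos hlh]
      by_cases hw : aWater n heights (PySem.Int.floordiv (lo + hi) 2) ≤ x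
      · rw [if_pos hw, if_pos (by rw [poured_eq_aWater]; exact hw), ih]
      · rw [if_neg hw, if_neg (by rw [poured_eq_aWater]; exact hw), ih]
    · rw [if_neg hlh, if_neg hlh]

lemma A_eq (n x : Int) (heights : List Int) :
    max_tank_height n x heights =
      (if aWater n heights (PySem.Int.floordiv ((aLoop n x heights (x + 1000000000).toNat 0 (x + 1000000000)).1 + (aLoop n x heights (x + 1000000000).toNat 0 (x + 1000000000)).2) 2) > x
       then PySem.Int.floordiv ((aLoop n x heights (x + 1000000000).toNat 0 (x + 1000000000)).1 + (aLoop n x heights (x + 1000000000).toNat 0 (x + 1000000000)).2) 2 - 1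
       else PySem.Int.floordiv ((aLoop n x heights (x + 1000000000).toNat 0 (x + 1000000000)).1 + (aLoop n x heights (x + 1000000000).toNat 0 (x + 1000000000)).2) 2) := rfl

lemma B_eq (n x : Int) (heights : List Int) :
    max_tank_height_alt n x heights =
      (if bPoured (bTanks n heights) (bPrefix (bTanks n heights)) (PySem.Int.floordiv ((bLoop (bTanks n heights) (bPrefix (bTanks n heights)) x (x + 1000000000).toNat 0 (x + 1000000000)).1 + (bLoop (bTanks n heights) (bPrefix (bTanks n heights)) x (x + 1000000000).toNat 0 (x + 1000000000)).2) 2) > x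
       then PySem.Int.floordiv ((bLoop (bTanks n heights) (bPrefix (bTanks n heights)) x (x + 1000000000).toNat 0 (x + 1000000000)).1 + (bLoop (bTanks n heights) (bPrefix (bTanks n heights)) x (x + 1000000000).toNat 0 (x + 1000000000)).2) 2 - 1
       else PySem.Int.floordiv ((bLoop (bTanks n heights) (bPrefix (bTanks n heights)) x (x + 1000000000).toNat 0 (x + 1000000000)).1 + (bLoop (bTanks n heights) (bPrefix (bTanks n heights)) x (x + 1000000000).toNat 0 (x + 1000000000)).2) 2) := rfl

-- ===== VERDICT (by name: the statement is the Claim_ definition above) =====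
theorem max_tank_height_spec : Claim_equal_max_tank_height := by
  intro n x heights _hdom _hpre
  unfold Spec_max_tank_height
  rw [A_eq, B_eq, loops_eq n x heights, poured_eq_aWater]
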